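-- pv_equiv track=rewrite | github.com/SemiAnalysisAI/InferenceX | experimental/multiturn/vllm_benchmark/flamegraphs/generate_flamegraphs.py | compute_cache_hits
-- ===== SOURCE A (Python) =====
-- def compute_cache_hits(requests: list[dict]) -> list[tuple[int, int]]:
--     """Return (hit_blocks, miss_blocks) for each request.
--
--     Simulates an infinite prefix cache: for each request, the longest
--     prefix match against any prior request determines hit blocks.
--     """
--     results = []
--     prior_hash_id_lists: list[list] = []
--
--     for req in requests:
--         hids = req.get("hash_ids", [])
--         n = len(hids)
--
--         if not prior_hash_id_lists:
--             results.append((0, n))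
--             prior_hash_id_lists.append(hids)
--             continue
--
--         best_overlap = 0
--         for prior in prior_hash_id_lists:
--             overlap = 0
--             for a, b in zip(prior, hids):
--                 if a == b:
--                     overlap += 1
--                 else:
--                     break
--             best_overlap = max(best_overlap, overlap)
--
--         results.append((best_overlap, n - best_overlap))
--         prior_hash_id_lists.append(hids)
--
--     return results
-- ===== SOURCE B (Python) =====
-- def compute_cache_hits(requests: list[dict]) -> list[tuple[int, int]]:
--     """Return (hit_blocks, miss_blocks) for each request.
--
--     Incremental prefix index: keep a set of every non-empty prefix of
--     earlier requests' hash_id lists; the longest cached prefix of the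
--     current request is found by extending the match one block at a time.
--     """
--     results = []
--     prefixes: set[tuple] = set()
--     for req in requests:
--         hids = req.get("hash_ids", [])
--         n = len(hids)
--         k = 0
--         while k < n and tuple(hids[: k + 1]) in prefixes:
--             k += 1
--         results.append((k, n - k))
--         for i in range(1, n + 1):
--             prefixes.add(tuple(hids[:i]))
--     return results
-- ===== Notes on version B (the rewrite author's own statement) =====
-- stated objective: faster
-- what changed: B replaces A's per-request rescan of every prior hash_id list (longest common prefix against each) with an incrementally maintained set of all non-empty prefixes of prior lists, extending the current request's match one block at a time.
import Mathlib
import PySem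

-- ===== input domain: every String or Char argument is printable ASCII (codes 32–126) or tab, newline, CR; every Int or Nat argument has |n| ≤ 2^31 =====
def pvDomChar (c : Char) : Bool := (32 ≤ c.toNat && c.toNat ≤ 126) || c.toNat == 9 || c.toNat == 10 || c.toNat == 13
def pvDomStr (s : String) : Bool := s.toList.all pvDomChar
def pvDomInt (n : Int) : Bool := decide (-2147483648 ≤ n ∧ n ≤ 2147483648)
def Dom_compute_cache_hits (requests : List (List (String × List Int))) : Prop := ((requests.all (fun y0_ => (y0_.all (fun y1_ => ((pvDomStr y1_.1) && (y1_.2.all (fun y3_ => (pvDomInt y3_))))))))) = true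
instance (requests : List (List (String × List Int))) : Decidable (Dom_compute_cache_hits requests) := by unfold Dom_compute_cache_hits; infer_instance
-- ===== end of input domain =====

-- B replaces A's scan of every prior list per request with an incrementally
-- maintained set of all non-empty prefixes of prior lists (faster: no per-prior rescan).


-- ===== PORT A =====
-- inner 'for a, b in zip(prior, hids): if a == b: overlap += 1 else: break'
def pvOverlapLoop : List (Int × Int) → Int → Int
  | [], overlap => overlap
  | (a, b) :: rest, overlap => if a == b then pvOverlapLoop rest (overlap + 1) else overlap

def compute_cache_hits (requests : List (List (String × List Int))) : List (Int × Int) :=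
  (requests.foldl
    (fun st req =>
      let results := st.1
      let prior_hash_id_lists := st.2
      let hids := (PySem.Dict.mk req).getD "hash_ids" []   -- req.get("hash_ids", [])
      let n : Int := hids.length
      if prior_hash_id_lists = [] then
        (results ++ [(0, n)], prior_hash_id_lists ++ [hids])
      else
        let best_overlap :=
          prior_hash_id_lists.foldl
            (fun best prior => max best (pvOverlapLoop (prior.zip hids) 0)) 0
        (results ++ [(best_overlap, n - best_overlap)], prior_hash_id_lists ++ [hids]))
    ([], [])).1

-- ===== PORT B =====
-- 'while k < n and tuple(hids[:k+1]) in prefixes: k += 1'  (hids[:k+1] = take (k+1), PySem.List.slice_to)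
def pvWalk (prefixes : PySem.Set (List Int)) (hids : List Int) (k : Nat) : Nat :=
  if k < hids.length ∧ PySem.Set.contains prefixes (hids.take (k + 1)) = true then
    pvWalk prefixes hids (k + 1)
  else k
  termination_by hids.length - k
  decreasing_by omega

def compute_cache_hits_alt (requests : List (List (String × List Int))) : List (Int × Int) :=
  (requests.foldl
    (fun st req =>
      let results := st.1
      let prefixes := st.2
      let hids := (PySem.Dict.mk req).getD "hash_ids" []   -- req.get("hash_ids", [])
      let n : Int := hids.length
      let k := pvWalk prefixes hids 0
      (results ++ [((k : Int), n - (k : Int))],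
       -- 'for i in range(1, n + 1): prefixes.add(tuple(hids[:i]))'
       (List.range' 1 hids.length).foldl (fun s i => PySem.Set.add s (hids.take i)) prefixes))
    ([], ([] : PySem.Set (List Int)))).1

-- ===== PRECONDITION & SPEC =====
def Spec_compute_cache_hits (requests : List (List (String × List Int))) (out : List (Int × Int)) : Prop := out = compute_cache_hits_alt requests
instance (requests : List (List (String × List Int))) (out : List (Int × Int)) : Decidable (Spec_compute_cache_hits requests out) := by unfold Spec_compute_cache_hits; infer_instance

-- ===== CLAIM (what is proved, stated in full; the proofs are below) =====
def Claim_equal_compute_cache_hits : Prop := ∀ (requests : List (List (String × List Int))), Dom_compute_cache_hits requests → Spec_compute_cache_hits requests (compute_cache_hits requests)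

-- ===== LEMMAS AND PROOFS =====

def pvCpl : List Int → List Int → Nat
  | a :: as, b :: bs => if a = b then pvCpl as bs + 1 else 0
  | _, _ => 0
theorem pvOverlapLoop_eq (p h : List Int) (c : Int) :
    pvOverlapLoop (p.zip h) c = c + (pvCpl p h : Int) := by
  induction p generalizing h c with
  | nil => simp [pvOverlapLoop, pvCpl]
  | cons a as ih =>
    cases h with
    | nil => simp [pvOverlapLoop, pvCpl]
    | cons b bs =>
      simp only [List.zip_cons_cons, pvOverlapLoop, pvCpl, beq_iff_eq]
      split <;> simp [ih]; ring

theorem pvCpl_ge_iff (p h : List Int) (k : Nat) :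
    k ≤ pvCpl p h ↔ k ≤ p.length ∧ k ≤ h.length ∧ h.take k = p.take k := by
  induction p generalizing h k with
  | nil => cases k <;> simp [pvCpl]
  | cons a as ih =>
    cases h with
    | nil => cases k <;> simp [pvCpl]
    | cons b bs =>
      cases k with
      | zero => simp
      | succ k =>
        simp only [pvCpl, List.length_cons, List.take_succ_cons]
        by_cases hab : a = b
        · subst hab
          rw [if_pos rfl]
          constructor
          · intro hk
            have := (ih bs k).mp (by omega)
            exact ⟨by omega, by omega, by simp [this.2.2]⟩
          · intro ⟨h1, h2, h3⟩
            simp only [List.cons.injEq] at h3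
            have := (ih bs k).mpr ⟨by omega, by omega, h3.2⟩
            omega
        · simp only [if_neg hab]
          constructor
          · omega
          · rintro ⟨-, -, h3⟩
            simp only [List.cons.injEq] at h3
            exact absurd h3.1.symm hab

theorem pvCpl_le_len (p h : List Int) : pvCpl p h ≤ h.length := by
  exact ((pvCpl_ge_iff p h _).mp le_rfl).2.1

def pvBestOf (priors : List (List Int)) (h : List Int) : Nat :=
  priors.foldl (fun b p => max b (pvCpl p h)) 0

theorem le_foldl_max_init (priors : List (List Int)) (h : List Int) (c : Nat) :
    c ≤ priors.foldl (fun b p => max b (pvCpl p h)) c := by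
  induction priors generalizing c with
  | nil => simp
  | cons q qs ih => exact le_trans (le_max_left c _) (ih _)

theorem le_pvBestOf_aux (priors : List (List Int)) (h p : List Int) (hp : p ∈ priors) (c : Nat) :
    pvCpl p h ≤ priors.foldl (fun b q => max b (pvCpl q h)) c := by
  induction priors generalizing c with
  | nil => simp at hp
  | cons q qs ih =>
    rcases List.mem_cons.mp hp with rfl | hp'
    · exact le_trans (le_max_right c _) (le_foldl_max_init qs h _)
    · exact ih hp' _

theorem le_pvBestOf (priors : List (List Int)) (h p : List Int) (hp : p ∈ priors) :
    pvCpl p h ≤ pvBestOf priors h := le_pvBestOf_aux priors h p hp 0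

theorem pvBestOf_cases_aux (priors : List (List Int)) (h : List Int) (c : Nat) :
    priors.foldl (fun b q => max b (pvCpl q h)) c = c ∨
    ∃ p ∈ priors, priors.foldl (fun b q => max b (pvCpl q h)) c = pvCpl p h := by
  induction priors generalizing c with
  | nil => simp
  | cons q qs ih =>
    rcases ih (max c (pvCpl q h)) with heq | ⟨p, hp, heq⟩
    · simp only [List.foldl_cons, heq]
      rcases max_choice c (pvCpl q h) with hm | hm
    -- max = c or = cpl q h
      · exact Or.inl hm
      · exact Or.inr ⟨q, List.mem_cons_self, hm⟩
    · exact Or.inr ⟨p, List.mem_cons_of_mem _ hp, heq⟩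

theorem pvBestOf_cases (priors : List (List Int)) (h : List Int) :
    pvBestOf priors h = 0 ∨ ∃ p ∈ priors, pvBestOf priors h = pvCpl p h :=
  pvBestOf_cases_aux priors h 0

theorem pvBestOf_le_len (priors : List (List Int)) (h : List Int) :
    pvBestOf priors h ≤ h.length := by
  rcases pvBestOf_cases priors h with h0 | ⟨p, -, heq⟩
  · omega
  · rw [heq]; exact pvCpl_le_len p h

theorem pvWalk_le (S : PySem.Set (List Int)) (h : List Int) (k : Nat) (hk : k ≤ h.length) :
    pvWalk S h k ≤ h.length := by
  induction k using pvWalk.induct (prefixes := S) (hids := h) with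
  | case1 k hc ih => rw [pvWalk, if_pos hc]; exact ih (by omega)
  | case2 k hc => rw [pvWalk, if_neg hc]; exact hk

theorem pvWalk_mem (S : PySem.Set (List Int)) (h : List Int) (k : Nat) :
    ∀ j, k < j → j ≤ pvWalk S h k → PySem.Set.contains S (h.take j) = true := by
  induction k using pvWalk.induct (prefixes := S) (hids := h) with
  | case1 k hc ih =>
    intro j hj1 hj2
    rw [pvWalk, if_pos hc] at hj2
    rcases Nat.lt_or_ge k (j - 1) with hlt | hge
    · exact ih j (by omega) hj2
    · have : j = k + 1 := by omega
      subst this; exact hc.2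
  | case2 k hc =>
    intro j hj1 hj2
    rw [pvWalk, if_neg hc] at hj2
    omega

theorem pvWalk_stop (S : PySem.Set (List Int)) (h : List Int) (k : Nat) :
    ¬ (pvWalk S h k < h.length ∧ PySem.Set.contains S (h.take (pvWalk S h k + 1)) = true) := by
  induction k using pvWalk.induct (prefixes := S) (hids := h) with
  | case1 k hc ih => rw [pvWalk, if_pos hc]; exact ih
  | case2 k hc => rw [pvWalk, if_neg hc]; exact hc

def pvInv (priors : List (List Int)) (S : PySem.Set (List Int)) : Prop :=
  ∀ l, l ∈ S ↔ ∃ p ∈ priors, ∃ i, 1 ≤ i ∧ i ≤ p.length ∧ l = p.take i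

theorem pvStep_eq (priors : List (List Int)) (S : PySem.Set (List Int)) (h : List Int)
    (hinv : pvInv priors S) : pvBestOf priors h = pvWalk S h 0 := by
  set w := pvWalk S h 0 with hw
  have hwle : w ≤ h.length := pvWalk_le S h 0 (by omega)
  apply Nat.le_antisymm
  · by_contra hlt
    rw [Nat.not_le] at hlt
    rcases pvBestOf_cases priors h with h0 | ⟨p, hp, heq⟩
    · omega
    · have hble := pvBestOf_le_len priors h
      have h1 : w + 1 ≤ pvCpl p h := by omega
      have h2 := (pvCpl_ge_iff p h (w + 1)).mp h1
      have hmem : h.take (w + 1) ∈ S := (hinv _).mpr ⟨p, hp, w + 1, by omega, h2.1, h2.2.2⟩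
      exact pvWalk_stop S h 0 ⟨by omega, (PySem.Set.contains_iff S _).mpr hmem⟩
  · rcases Nat.eq_zero_or_pos w with h0 | hpos
    · omega
    · have hcont := pvWalk_mem S h 0 w hpos le_rfl
      have hmem : h.take w ∈ S := (PySem.Set.contains_iff S _).mp hcont
      obtain ⟨p, hp, i, hi1, hi2, heq⟩ := (hinv _).mp hmem
      have hlen : (h.take w).length = w := by simp; omega
      have hiw : i = w := by rw [heq] at hlen; simp at hlen; omega
      subst hiw
      have hcw : w ≤ pvCpl p h := (pvCpl_ge_iff p h w).mpr ⟨hi2, hwle, heq⟩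
      exact le_trans hcw (le_pvBestOf priors h p hp)

theorem pvInv_preserve (priors : List (List Int)) (S : PySem.Set (List Int)) (h : List Int)
    (hinv : pvInv priors S) :
    pvInv (priors ++ [h])
      ((List.range' 1 h.length).foldl (fun s i => PySem.Set.add s (h.take i)) S) := by
  intro l
  rw [PySem.Set.mem_foldl_add]
  constructor
  · rintro (hl | ⟨i, hi, rfl⟩)
    · obtain ⟨p, hp, i, hi1, hi2, rfl⟩ := (hinv l).mp hl
      exact ⟨p, List.mem_append_left _ hp, i, hi1, hi2, rfl⟩
    · rw [List.mem_range'_1] at hi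
      exact ⟨h, List.mem_append_right _ (List.mem_singleton_self h), i, by omega, by omega, rfl⟩
  · rintro ⟨p, hp, i, hi1, hi2, rfl⟩
    rcases List.mem_append.mp hp with hp' | hp'
    · exact Or.inl ((hinv _).mpr ⟨p, hp', i, hi1, hi2, rfl⟩)
    · rw [List.mem_singleton] at hp'
      subst hp'
      exact Or.inr ⟨i, List.mem_range'_1.mpr (by omega), rfl⟩

theorem pvFoldInt_aux (priors : List (List Int)) (h : List Int) (c : Nat) :
    priors.foldl (fun best prior => max best (pvOverlapLoop (prior.zip h) 0)) (c : Int) =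
      ((priors.foldl (fun b p => max b (pvCpl p h)) c : Nat) : Int) := by
  induction priors generalizing c with
  | nil => simp
  | cons q qs ih =>
    rw [List.foldl_cons, List.foldl_cons, pvOverlapLoop_eq, zero_add,
      show max (c : Int) (pvCpl q h : Int) = ((max c (pvCpl q h) : Nat) : Int) from
        (Nat.cast_max c (pvCpl q h)).symm]
    exact ih _

theorem pvFoldInt (priors : List (List Int)) (h : List Int) :
    priors.foldl (fun best prior => max best (pvOverlapLoop (prior.zip h) 0)) 0 =
      (pvBestOf priors h : Int) := by
  simpa using pvFoldInt_aux priors h 0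

def pvAStep (st : List (Int × Int) × List (List Int)) (req : List (String × List Int)) :
    List (Int × Int) × List (List Int) :=
  let results := st.1
  let prior_hash_id_lists := st.2
  let hids := (PySem.Dict.mk req).getD "hash_ids" []
  let n : Int := hids.length
  if prior_hash_id_lists = [] then
    (results ++ [(0, n)], prior_hash_id_lists ++ [hids])
  else
    let best_overlap :=
      prior_hash_id_lists.foldl
        (fun best prior => max best (pvOverlapLoop (prior.zip hids) 0)) 0
    (results ++ [(best_overlap, n - best_overlap)], prior_hash_id_lists ++ [hids])

def pvBStep (st : List (Int × Int) × PySem.Set (List Int)) (req : List (String × List Int)) :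
    List (Int × Int) × PySem.Set (List Int) :=
  let results := st.1
  let prefixes := st.2
  let hids := (PySem.Dict.mk req).getD "hash_ids" []
  let n : Int := hids.length
  let k := pvWalk prefixes hids 0
  (results ++ [((k : Int), n - (k : Int))],
   (List.range' 1 hids.length).foldl (fun s i => PySem.Set.add s (hids.take i)) prefixes)

theorem pvMain (reqs : List (List (String × List Int))) (res : List (Int × Int))
    (priors : List (List Int)) (S : PySem.Set (List Int)) (hinv : pvInv priors S) :
    (reqs.foldl pvAStep (res, priors)).1 = (reqs.foldl pvBStep (res, S)).1 := by
  induction reqs generalizing res priors S with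
  | nil => rfl
  | cons req rest ih =>
    rw [List.foldl_cons, List.foldl_cons]
    have hstep : pvBestOf priors ((PySem.Dict.mk req).getD "hash_ids" []) =
        pvWalk S ((PySem.Dict.mk req).getD "hash_ids" []) 0 := pvStep_eq _ _ _ hinv
    have hinv' := pvInv_preserve priors S ((PySem.Dict.mk req).getD "hash_ids" []) hinv
    by_cases hpe : priors = []
    · subst hpe
      have h0 : pvWalk S ((PySem.Dict.mk req).getD "hash_ids" []) 0 = 0 := by
        rw [← hstep]; rfl
      have hA : pvAStep (res, []) req =
          (res ++ [(0, (((PySem.Dict.mk req).getD "hash_ids" []).length : Int))],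
           [(PySem.Dict.mk req).getD "hash_ids" []]) := by
        simp [pvAStep]
      have hB : pvBStep (res, S) req =
          (res ++ [(0, (((PySem.Dict.mk req).getD "hash_ids" []).length : Int))],
           (List.range' 1 ((PySem.Dict.mk req).getD "hash_ids" []).length).foldl
             (fun s i => PySem.Set.add s (((PySem.Dict.mk req).getD "hash_ids" []).take i)) S) := by
        simp [pvBStep, h0]
      rw [hA, hB]
      exact ih _ _ _ (by simpa using hinv')
    · have hA : pvAStep (res, priors) req =
          (res ++ [((pvBestOf priors ((PySem.Dict.mk req).getD "hash_ids" []) : Int),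
              (((PySem.Dict.mk req).getD "hash_ids" []).length : Int) -
                (pvBestOf priors ((PySem.Dict.mk req).getD "hash_ids" []) : Int))],
           priors ++ [(PySem.Dict.mk req).getD "hash_ids" []]) := by
        simp only [pvAStep, if_neg hpe, pvFoldInt]
      have hB : pvBStep (res, S) req =
          (res ++ [((pvWalk S ((PySem.Dict.mk req).getD "hash_ids" []) 0 : Int),
              (((PySem.Dict.mk req).getD "hash_ids" []).length : Int) -
                (pvWalk S ((PySem.Dict.mk req).getD "hash_ids" []) 0 : Int))],
           (List.range' 1 ((PySem.Dict.mk req).getD "hash_ids" []).length).foldl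
             (fun s i => PySem.Set.add s (((PySem.Dict.mk req).getD "hash_ids" []).take i)) S) := rfl
      rw [hA, hB, hstep]
      exact ih _ _ _ hinv'

-- ===== VERDICT (by name: the statement is the Claim_ definition above) =====
theorem compute_cache_hits_spec : Claim_equal_compute_cache_hits := by
  intro reqs _
  show compute_cache_hits reqs = compute_cache_hits_alt reqs
  have hA : compute_cache_hits reqs = (reqs.foldl pvAStep ([], [])).1 := rfl
  have hB : compute_cache_hits_alt reqs = (reqs.foldl pvBStep ([], [])).1 := rfl
  rw [hA, hB]
  exact pvMain reqs [] [] [] (by intro l; simp)
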